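-- pv_equiv track=rewrite | github.com/CraftOS-dev/living-ui-marketplace | word-improve/backend/text_utils.py | join_units
-- ===== SOURCE A (Python) =====
-- from typing import List, Dict, Any, Tuple
--
-- PARAGRAPH_BREAK = "\n\n"
--
-- def join_units(units: List[str]) -> str:
--     """Reconstruct text from a list of units (sentences and paragraph breaks)."""
--     out: List[str] = []
--     prev_was_break = True  # treat start of buffer as a "break"
--     for u in units:
--         if not u:
--             continue
--         if u == PARAGRAPH_BREAK or u == "\n":
--             out.append(u)
--             prev_was_break = True
--         else:
--             if not prev_was_break:
--                 out.append(" ")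
--             out.append(u)
--             prev_was_break = False
--     return "".join(out).strip()
-- ===== SOURCE B (Python) =====
-- PARAGRAPH_BREAK = "\n\n"
--
--
-- def _is_break(u):
--     return u == PARAGRAPH_BREAK or u == "\n"
--
--
-- def join_units(units):
--     """Reconstruct text from a list of units (sentences and paragraph breaks)."""
--     parts = [u for u in units if u]
--     pieces = []
--     i, n = 0, len(parts)
--     while i < n:
--         j = i
--         if _is_break(parts[i]):
--             while j < n and _is_break(parts[j]):
--                 j += 1
--             pieces.append("".join(parts[i:j]))
--         else:
--             while j < n and not _is_break(parts[j]):
--                 j += 1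
--             pieces.append(" ".join(parts[i:j]))
--         i = j
--     return "".join(pieces).strip()
-- ===== Notes on version B (the rewrite author's own statement) =====
-- stated objective: alternative
-- what changed: Replaces A's single-pass state machine with a prev_was_break flag by filter-then-run-grouping: drop empty units, split the remainder into maximal runs of break vs sentence units, join sentence runs with ' ' and break runs with '', concatenate and strip.
import Mathlib
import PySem

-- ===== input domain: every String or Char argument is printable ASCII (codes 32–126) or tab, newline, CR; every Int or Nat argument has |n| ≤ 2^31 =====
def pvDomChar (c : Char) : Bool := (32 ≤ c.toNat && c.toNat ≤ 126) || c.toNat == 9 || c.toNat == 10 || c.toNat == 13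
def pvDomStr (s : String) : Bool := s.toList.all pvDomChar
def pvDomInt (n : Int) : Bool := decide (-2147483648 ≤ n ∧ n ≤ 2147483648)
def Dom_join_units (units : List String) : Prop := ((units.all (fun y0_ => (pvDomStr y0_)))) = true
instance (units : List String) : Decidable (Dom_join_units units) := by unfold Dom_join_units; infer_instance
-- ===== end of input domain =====

-- B replaces A's prev_was_break state machine by filter-empties + grouping into maximal
-- break/sentence runs joined with ""/" " (alternative decomposition, same cost).


-- ===== PORT A =====
-- one loop step of A: skip empties, append break and flip the flag, else maybe a space then the unit
def joinStep (st : List String × Bool) (u : String) : List String × Bool :=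
  if u == "" then st
  else if u == "\n\n" || u == "\n" then (st.1 ++ [u], true)
  else if st.2 then (st.1 ++ [u], false) else (st.1 ++ [" ", u], false)

def join_units (units : List String) : String :=
  PySem.Str.strip (PySem.Str.join "" (units.foldl joinStep ([], true)).1)

-- ===== PORT B =====
def isBreakU (u : String) : Bool := u == "\n\n" || u == "\n"

-- Source B's while loop: peel one maximal run at a time, join break runs with "" and sentence runs with " "
def groupPieces : List String → List String
  | [] => []
  | u :: rest =>
    if isBreakU u then
      PySem.Str.join "" (u :: rest.takeWhile isBreakU) :: groupPieces (rest.dropWhile isBreakU)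
    else
      PySem.Str.join " " (u :: rest.takeWhile (fun v => !isBreakU v)) :: groupPieces (rest.dropWhile (fun v => !isBreakU v))
  termination_by xs => xs.length
  decreasing_by
    · exact Nat.lt_succ_of_le (List.length_dropWhile_le _ _)
    · exact Nat.lt_succ_of_le (List.length_dropWhile_le _ _)

def join_units_alt (units : List String) : String :=
  PySem.Str.strip (PySem.Str.join "" (groupPieces (units.filter (fun u => u != ""))))

-- ===== PRECONDITION & SPEC =====
def Spec_join_units (units : List String) (out : String) : Prop := out = join_units_alt units
instance (units : List String) (out : String) : Decidable (Spec_join_units units out) := by unfold Spec_join_units; infer_instance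

-- ===== CLAIM (what is proved, stated in full; the proofs are below) =====
def Claim_equal_join_units : Prop := ∀ (units : List String), Dom_join_units units → Spec_join_units units (join_units units)

-- ===== LEMMAS AND PROOFS =====

-- the list of pieces A appends for the remaining units, given the current flag
def runA (prev : Bool) : List String → List String
  | [] => []
  | u :: us =>
    if u == "" then runA prev us
    else if u == "\n\n" || u == "\n" then u :: runA true us
    else (if prev then [u] else [" ", u]) ++ runA false us

-- flattened characters of a piece list
def JC (pieces : List String) : List Char := (pieces.map String.toList).flatten

theorem JC_nil : JC [] = [] := rfl

theorem JC_cons (p : String) (l : List String) : JC (p :: l) = p.toList ++ JC l := by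
  simp [JC]

theorem JC_append (l₁ l₂ : List String) : JC (l₁ ++ l₂) = JC l₁ ++ JC l₂ := by
  simp [JC]

theorem join_empty_toList (l : List String) :
    (PySem.Str.join "" l).toList = JC l := by
  induction l with
  | nil => simp [PySem.Str.toList_join, PySem.Chars.join_nil, JC_nil]
  | cons p l ih =>
    cases l with
    | nil => simp [PySem.Str.toList_join, PySem.Chars.join_singleton, JC_cons, JC_nil]
    | cons q r =>
      have h := PySem.Chars.join_cons_cons "".toList p.toList q.toList (r.map String.toList)
      simp only [PySem.Str.toList_join, List.map_cons] at *
      rw [h, JC_cons, ← ih]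
      simp

theorem join_space_toList (u : String) (ts : List String) :
    (PySem.Str.join " " (u :: ts)).toList
      = u.toList ++ (ts.map (fun v => ' ' :: v.toList)).flatten := by
  induction ts generalizing u with
  | nil => simp [PySem.Str.toList_join, PySem.Chars.join_singleton]
  | cons q r ih =>
    have h := PySem.Chars.join_cons_cons " ".toList u.toList q.toList (r.map String.toList)
    have ihq := ih q
    simp only [PySem.Str.toList_join, List.map_cons] at *
    rw [h, ihq]
    simp

theorem foldA (xs : List String) (out : List String) (prev : Bool) :
    (xs.foldl joinStep (out, prev)).1 = out ++ runA prev xs := by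
  induction xs generalizing out prev with
  | nil => simp [runA]
  | cons u us ih =>
    simp only [List.foldl_cons, joinStep, runA]
    split_ifs <;> simp [ih]

-- break units are nonempty
theorem break_ne_empty (u : String) (h : isBreakU u = true) : (u == "") = false := by
  simp only [isBreakU, Bool.or_eq_true, beq_iff_eq] at h
  rcases h with h | h <;> subst h <;> decide

-- peeling a maximal break run off runA true
theorem runA_break_run (xs : List String) :
    JC (runA true xs)
      = JC (xs.takeWhile isBreakU) ++ JC (runA true (xs.dropWhile isBreakU)) := by
  induction xs with
  | nil => simp [runA, JC_nil]
  | cons u us ih =>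
    by_cases hb : isBreakU u = true
    · have hne := break_ne_empty u hb
      have hbr : (u == "\n\n" || u == "\n") = true := hb
      simp only [runA, hne, hbr, if_false, if_true, List.takeWhile_cons, List.dropWhile_cons,
        Bool.false_eq_true, hb, JC_cons, ih]
      simp
    · have hb' : isBreakU u = false := by simpa using hb
      simp [hb', JC_nil]

-- peeling a maximal sentence run off runA false (each following sentence contributes " " ++ it)
theorem runA_sent_run (xs : List String) (hne : ∀ u ∈ xs, (u == "") = false) :
    JC (runA false xs)
      = ((xs.takeWhile (fun v => !isBreakU v)).map (fun v => ' ' :: v.toList)).flatten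
        ++ JC (runA true (xs.dropWhile (fun v => !isBreakU v))) := by
  induction xs with
  | nil => simp [runA, JC_nil]
  | cons u us ih =>
    have hu : (u == "") = false := hne u (by simp)
    have hne' : ∀ v ∈ us, (v == "") = false := fun v hv => hne v (by simp [hv])
    by_cases hb : isBreakU u = true
    · have hbr : (u == "\n\n" || u == "\n") = true := hb
      simp [runA, hu, hbr, hb]
    · have hb' : isBreakU u = false := by simpa using hb
      have hbr : (u == "\n\n" || u == "\n") = false := hb'
      simp only [runA, hu, hbr, if_false, Bool.false_eq_true, List.takeWhile_cons,
        List.dropWhile_cons, hb', Bool.not_false, if_true, JC_append, JC_cons, JC_nil,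
        ih hne', List.map_cons, List.flatten_cons]
      simp

-- runA on the empty-filtered list is runA on the list itself
theorem runA_filter (prev : Bool) (xs : List String) :
    runA prev (xs.filter (fun u => u != "")) = runA prev xs := by
  induction xs generalizing prev with
  | nil => rfl
  | cons u us ih =>
    by_cases h : u = ""
    · subst h
      simp [runA, ih]
    · have h' : (u == "") = false := by simpa using h
      have hcond : (u != "") = true := by simp [bne, h']
      rw [List.filter_cons, if_pos hcond]
      simp only [runA]
      split_ifs <;> first | exact ih _ | exact congrArg _ (ih _)

theorem group_eq_runA (xs : List String) (hne : ∀ u ∈ xs, (u == "") = false) :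
    JC (groupPieces xs) = JC (runA true xs) := by
  induction xs using groupPieces.induct with
  | case1 => simp [groupPieces, runA, JC_nil]
  | case2 u rest hb ih =>
    have hne' : ∀ v ∈ rest.dropWhile isBreakU, (v == "") = false :=
      fun v hv => hne v (List.mem_cons_of_mem u ((List.dropWhile_sublist _).subset hv))
    rw [groupPieces]
    simp only [hb, if_true, JC_cons, ih hne']
    have h1 : (PySem.Str.join "" (u :: rest.takeWhile isBreakU)).toList
        = JC (u :: rest.takeWhile isBreakU) := join_empty_toList _
    have h2 := runA_break_run (u :: rest)
    simp only [List.takeWhile_cons, List.dropWhile_cons, hb, if_true, JC_cons] at h2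
    rw [h1, h2, JC_cons]
  | case3 u rest hb ih =>
    have hb' : isBreakU u = false := by simpa using hb
    have hu : (u == "") = false := hne u (by simp)
    have hne'' : ∀ v ∈ rest, (v == "") = false := fun v hv => hne v (by simp [hv])
    have hne' : ∀ v ∈ rest.dropWhile (fun v => !isBreakU v), (v == "") = false :=
      fun v hv => hne'' v ((List.dropWhile_sublist _).subset hv)
    rw [groupPieces]
    simp only [hb', Bool.false_eq_true, if_false, JC_cons, ih hne']
    have hbr : (u == "\n\n" || u == "\n") = false := hb'
    have hr : runA true (u :: rest) = u :: runA false rest := by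
      simp [runA, hu, hbr]
    rw [hr, JC_cons, join_space_toList, runA_sent_run rest hne'']
    simp

theorem main_eq (units : List String) : join_units units = join_units_alt units := by
  unfold join_units join_units_alt
  congr 1
  apply String.toList_injective
  rw [join_empty_toList, join_empty_toList, foldA]
  have hne : ∀ u ∈ units.filter (fun u => u != ""), (u == "") = false := by
    intro u hu
    have := List.of_mem_filter hu
    simpa [bne] using this
  rw [group_eq_runA _ hne, runA_filter]
  simp

-- ===== VERDICT (by name: the statement is the Claim_ definition above) =====
theorem join_units_spec : Claim_equal_join_units := by
  intro units _
  unfold Spec_join_units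
  exact main_eq units
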